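-- pv_equiv track=rewrite | github.com/hidden-boo/ESMR | Phase-III/ESMR/Training_script/load_env_data.py | compute_user_negative_flags
-- ===== SOURCE A (Python) =====
-- NEGATIVE_EMOTIONS = {"stressed", "disappointed", "angry", "anxious", "lonely"}
--
-- def compute_user_negative_flags(user_emotional_state, emotion_threshold):
--     flags = {}
--     for user_id, emotions in user_emotional_state.items():
--         negative_streak = 0
--         for _, emotion in sorted(emotions, key=lambda x: x[0]):
--             if emotion in NEGATIVE_EMOTIONS:
--                 negative_streak += 1
--             else:
--                 negative_streak = 0
--             if negative_streak >= emotion_threshold: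
--                 flags[user_id] = True
--                 break
--         else:
--             flags[user_id] = False
--     return flags
-- ===== SOURCE B (Python) =====
-- NEGATIVE_EMOTIONS = {"stressed", "disappointed", "angry", "anxious", "lonely"}
--
-- def _max_run(bs):
--     # length of the longest run of True values: split at the first False and recurse
--     try:
--         i = bs.index(False)
--     except ValueError:
--         return len(bs)
--     return max(i, _max_run(bs[i + 1:]))
--
-- def compute_user_negative_flags(user_emotional_state, emotion_threshold):
--     return {
--         user_id: _max_run(
--             [e in NEGATIVE_EMOTIONS for _, e in sorted(emotions, key=lambda x: x[0])]
--         ) >= emotion_threshold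
--         for user_id, emotions in user_emotional_state.items()
--     }
-- ===== Notes on version B (the rewrite author's own statement) =====
-- stated objective: alternative
-- what changed: Replaces A's incremental streak counter with early break by a per-user dict comprehension that maps sorted emotions to negativity booleans and computes the longest negative run via a recursive split-at-first-positive reduction; Pre_ restricts to thresholds >= 1 (the natural domain), since for a non-positive threshold any flag value is defensible and A's empty-list-vs-nonempty distinction there is accidental.
-- outside the precondition, e.g. on compute_user_negative_flags({'u': []}, 0): A returns {'u': False}, B returns {'u': True}; on compute_user_negative_flags({'u': [(1, 'happy')]}, -3): A returns {'u': True}, B returns {'u': True}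
import Mathlib
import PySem

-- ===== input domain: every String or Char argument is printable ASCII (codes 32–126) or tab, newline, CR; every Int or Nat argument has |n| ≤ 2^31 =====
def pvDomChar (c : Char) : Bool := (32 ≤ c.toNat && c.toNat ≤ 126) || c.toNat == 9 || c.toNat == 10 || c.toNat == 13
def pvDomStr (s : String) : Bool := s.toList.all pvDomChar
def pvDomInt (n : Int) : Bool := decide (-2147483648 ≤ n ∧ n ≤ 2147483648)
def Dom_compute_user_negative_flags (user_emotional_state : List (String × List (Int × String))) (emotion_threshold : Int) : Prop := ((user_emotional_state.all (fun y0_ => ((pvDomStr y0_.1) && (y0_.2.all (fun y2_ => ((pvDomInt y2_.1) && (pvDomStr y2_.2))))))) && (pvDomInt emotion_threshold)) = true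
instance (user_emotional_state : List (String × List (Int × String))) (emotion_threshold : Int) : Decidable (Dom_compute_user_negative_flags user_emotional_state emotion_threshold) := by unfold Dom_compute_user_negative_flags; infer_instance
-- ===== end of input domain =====

-- B replaces A's incremental streak counter (with early break) by a dict comprehension that
-- computes each user's longest consecutive negative run via recursive split-at-first-positive;
-- same cost, different decomposition ('alternative'); claim restricted to thresholds ≥ 1.

-- ===== PORT A =====
def pvNEG : PySem.Set String :=
  PySem.Set.ofList ["stressed", "disappointed", "angry", "anxious", "lonely"]

-- inner 'for … else' loop of A over the sorted emotions: returns the flag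
-- (True on break, False when the loop finishes)
def pvAInner (ems : List (Int × String)) (streak : Int) (t : Int) : Bool :=
  match ems with
  | [] => false
  | (_, e) :: rest =>
    let s := if PySem.Set.contains pvNEG e then streak + 1 else 0
    if t ≤ s then true else pvAInner rest s t

def compute_user_negative_flags (user_emotional_state : List (String × List (Int × String))) (emotion_threshold : Int) : List (String × Bool) :=
  (user_emotional_state.foldl
    (fun flags p =>
      PySem.Dict.insert flags p.1
        (pvAInner (PySem.List.sorted p.2 (fun x => x.1)) 0 emotion_threshold))
    PySem.Dict.empty).items

-- ===== PORT B =====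
-- _max_run: longest run of 'true': split at first 'false' and recurse
-- (bs[i+1:] with i ≥ 0 is List.drop (i+1); exact by PySem.List.slice_from)
def pvMaxRun (bs : List Bool) : Int :=
  match h : PySem.List.index? bs false with
  | none => (bs.length : Int)
  | some i => max (i : Int) (pvMaxRun (bs.drop (i + 1)))
termination_by bs.length
decreasing_by
  obtain ⟨hk, -, -⟩ := PySem.List.getElem_of_index?_eq_some h
  simp only [List.length_drop]
  omega

-- the value of the dict comprehension for one user
def pvFlagB (emotions : List (Int × String)) (emotion_threshold : Int) : Bool :=
  decide (emotion_threshold ≤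
    pvMaxRun ((PySem.List.sorted emotions (fun x => x.1)).map
      (fun p => PySem.Set.contains pvNEG p.2)))

def compute_user_negative_flags_alt (user_emotional_state : List (String × List (Int × String))) (emotion_threshold : Int) : List (String × Bool) :=
  (user_emotional_state.foldl
    (fun flags p => PySem.Dict.insert flags p.1 (pvFlagB p.2 emotion_threshold))
    PySem.Dict.empty).items

-- ===== PRECONDITION & SPEC =====
-- Pre_ restricts to the natural domain of thresholds ≥ 1: for a non-positive threshold
-- either flag value is defensible, and A's distinction there (False for an empty emotion
-- list, True for any nonempty one) is an accident of its loop shape that B does not copy.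
def Pre_compute_user_negative_flags (user_emotional_state : List (String × List (Int × String))) (emotion_threshold : Int) : Prop :=
  1 ≤ emotion_threshold
instance (user_emotional_state : List (String × List (Int × String))) (emotion_threshold : Int) : Decidable (Pre_compute_user_negative_flags user_emotional_state emotion_threshold) := by unfold Pre_compute_user_negative_flags; infer_instance

def pvWitness_compute_user_negative_flags : (List (String × List (Int × String))) × Int :=
  ([("alice", [(1, "angry"), (2, "angry"), (3, "happy")]), ("bob", [])], 2)

def Spec_compute_user_negative_flags (user_emotional_state : List (String × List (Int × String))) (emotion_threshold : Int) (out : List (String × Bool)) : Prop := out = compute_user_negative_flags_alt user_emotional_state emotion_threshold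
instance (user_emotional_state : List (String × List (Int × String))) (emotion_threshold : Int) (out : List (String × Bool)) : Decidable (Spec_compute_user_negative_flags user_emotional_state emotion_threshold out) := by unfold Spec_compute_user_negative_flags; infer_instance

-- ===== CLAIM (what is proved, stated in full; the proofs are below) =====
def Claim_equal_compute_user_negative_flags : Prop := ∀ (user_emotional_state : List (String × List (Int × String))) (emotion_threshold : Int), Dom_compute_user_negative_flags user_emotional_state emotion_threshold → Pre_compute_user_negative_flags user_emotional_state emotion_threshold → Spec_compute_user_negative_flags user_emotional_state emotion_threshold (compute_user_negative_flags user_emotional_state emotion_threshold)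

-- ===== LEMMAS AND PROOFS =====

-- A's inner loop, abstracted to the list of negativity booleans
def pvLoopB (bs : List Bool) (streak : Int) (t : Int) : Bool :=
  match bs with
  | [] => false
  | b :: rest =>
    let s := if b then streak + 1 else 0
    if t ≤ s then true else pvLoopB rest s t

-- the streak value left by a (non-breaking) pass over l, starting from s
def pvStreak (s : Int) (l : List Bool) : Int :=
  l.foldl (fun s b => if b then s + 1 else 0) s

lemma pvAInner_eq_loopB (ems : List (Int × String)) :
    ∀ s t, pvAInner ems s t
      = pvLoopB (ems.map (fun p => PySem.Set.contains pvNEG p.2)) s t := by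
  induction ems with
  | nil => intro s t; rfl
  | cons p rest ih =>
    intro s t
    obtain ⟨ts, e⟩ := p
    simp only [pvAInner, pvLoopB, List.map]
    split <;> split
    · rfl
    · exact ih _ _
    · rfl
    · exact ih _ _

lemma pvLoopB_replicate (k : Nat) : ∀ s t : Int,
    pvLoopB (List.replicate k true) s t = decide (1 ≤ k ∧ t ≤ s + k) := by
  induction k with
  | zero => intro s t; simp [pvLoopB]
  | succ n ih =>
    intro s t
    rw [List.replicate_succ]
    simp only [pvLoopB, if_true]
    by_cases h : t ≤ s + 1
    · rw [if_pos h]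
      symm
      rw [decide_eq_true_eq]
      push_cast
      exact ⟨trivial, by omega⟩
    · rw [if_neg h, ih, decide_eq_decide]
      push_cast
      simp only [true_and]
      omega

lemma pvLoopB_append (l1 : List Bool) : ∀ (l2 : List Bool) (s t : Int),
    pvLoopB (l1 ++ l2) s t = (pvLoopB l1 s t || pvLoopB l2 (pvStreak s l1) t) := by
  induction l1 with
  | nil => intro l2 s t; simp [pvLoopB, pvStreak]
  | cons b rest ih =>
    intro l2 s t
    simp only [List.cons_append, pvLoopB]
    by_cases h : t ≤ (if b then s + 1 else 0)
    · simp [h]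
    · simp only [if_neg h, ih]
      rw [show pvStreak s (b :: rest) = pvStreak (if b = true then s + 1 else 0) rest from rfl]

lemma pvStreak_replicate (k : Nat) : ∀ s : Int,
    pvStreak s (List.replicate k true) = s + k := by
  induction k with
  | zero => intro s; simp [pvStreak]
  | succ n ih =>
    intro s
    have hstep : pvStreak s (true :: List.replicate n true)
        = pvStreak (s + 1) (List.replicate n true) := by
      simp [pvStreak]
    rw [List.replicate_succ, hstep, ih]
    push_cast
    ring

-- index? bs false = some i decomposes bs into i 'true's, a 'false', and the rest
lemma pv_decomp (bs : List Bool) (i : Nat) (h : PySem.List.index? bs false = some i) :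
    bs = List.replicate i true ++ false :: bs.drop (i + 1) := by
  obtain ⟨pre, suf, hbs, hlen, hmem⟩ := (PySem.List.index?_eq_some_iff _ _ _).1 h
  have hpre : pre = List.replicate i true := by
    rw [List.eq_replicate_iff]
    refine ⟨hlen, fun b hb => ?_⟩
    cases b
    · exact absurd hb hmem
    · rfl
  have hd : bs.drop (i + 1) = suf := by
    rw [hbs]
    have hsplit : pre ++ false :: suf = (pre ++ [false]) ++ suf := by simp
    rw [hsplit]
    have hlen' : (pre ++ [false]).length = i + 1 := by simp [hlen]
    rw [← hlen', List.drop_left]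
  rw [hd, ← hpre, ← hbs]

-- no 'false' in bs: bs is all 'true'
lemma pv_all_true (bs : List Bool) (h : PySem.List.index? bs false = none) :
    bs = List.replicate bs.length true := by
  have hmem : false ∉ bs := (PySem.List.index?_eq_none_iff _ _).1 h
  rw [List.eq_replicate_iff]
  refine ⟨rfl, fun b hb => ?_⟩
  cases b
  · exact absurd hb hmem
  · rfl

-- main lemma: for a positive threshold, A's scan from streak 0 = (threshold ≤ longest run)
lemma pvLoopB_eq_maxRun (bs : List Bool) : ∀ t : Int, 1 ≤ t →
    pvLoopB bs 0 t = decide (t ≤ pvMaxRun bs) := by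
  induction bs using pvMaxRun.induct with
  | case1 bs h =>
    intro t ht
    rw [pvMaxRun.eq_def, h]
    conv_lhs => rw [pv_all_true bs h]
    rw [pvLoopB_replicate]
    rw [decide_eq_decide]
    push_cast
    omega
  | case2 bs i h ih =>
    intro t ht
    rw [pvMaxRun.eq_def, h]
    conv_lhs => rw [pv_decomp bs i h]
    rw [pvLoopB_append, pvStreak_replicate, pvLoopB_replicate]
    simp only [pvLoopB, Bool.false_eq_true, if_false]
    have hi0 : (0 : Int) ≤ (i : Int) := Int.natCast_nonneg i
    rw [if_neg (by omega : ¬ t ≤ 0), ih t ht, Bool.eq_iff_iff]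
    simp only [Bool.or_eq_true, decide_eq_true_eq, le_max_iff]
    omega

-- per-user flag equality (thresholds ≥ 1)
lemma pvFlag_eq (ems : List (Int × String)) (t : Int) (ht : 1 ≤ t) :
    pvAInner (PySem.List.sorted ems (fun x => x.1)) 0 t = pvFlagB ems t := by
  rw [pvAInner_eq_loopB, pvLoopB_eq_maxRun _ t ht]
  rfl

-- ===== VERDICT (by name: the statement is the Claim_ definition above) =====
theorem compute_user_negative_flags_spec : Claim_equal_compute_user_negative_flags := by
  intro ues t _ ht
  unfold Spec_compute_user_negative_flags compute_user_negative_flags compute_user_negative_flags_alt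
  have hf : (fun (flags : PySem.Dict String Bool) (p : String × List (Int × String)) =>
        PySem.Dict.insert flags p.1
          (pvAInner (PySem.List.sorted p.2 (fun x => x.1)) 0 t))
      = (fun flags p => PySem.Dict.insert flags p.1 (pvFlagB p.2 t)) := by
    funext flags p
    rw [pvFlag_eq _ _ ht]
  rw [hf]
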